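-- pv_equiv track=rewrite | github.com/sauravsoni6377/SU_A2_B22AI035 | src/phonetics/g2p_hinglish.py | _fallback_eng_ipa
-- ===== SOURCE A (Python) =====
-- _EN_FALLBACK = [
--     ("tion", "ʃən"), ("ing", "ɪŋ"), ("ck", "k"), ("sh", "ʃ"), ("ch", "tʃ"),
--     ("ph", "f"), ("th", "θ"), ("oo", "uː"), ("ee", "iː"), ("ou", "aʊ"),
--     ("oi", "ɔɪ"), ("ai", "eɪ"), ("ay", "eɪ"), ("ey", "eɪ"),
--     ("a", "æ"), ("e", "ɛ"), ("i", "ɪ"), ("o", "ɒ"), ("u", "ʌ"),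
-- ]
--
-- def _fallback_eng_ipa(w: str) -> str:
--     out, i, s = [], 0, w.lower()
--     while i < len(s):
--         matched = False
--         for L in (4, 3, 2, 1):
--             if i + L > len(s):
--                 continue
--             sub = s[i:i + L]
--             for src, tgt in _EN_FALLBACK:
--                 if sub == src:
--                     out.append(tgt); i += L; matched = True; break
--             if matched:
--                 break
--         if not matched:
--             out.append(s[i]); i += 1
--     return "".join(out)
-- ===== SOURCE B (Python) =====
-- _EN_FALLBACK = [
--     ("tion", "ʃən"), ("ing", "ɪŋ"), ("ck", "k"), ("sh", "ʃ"), ("ch", "tʃ"),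
--     ("ph", "f"), ("th", "θ"), ("oo", "uː"), ("ee", "iː"), ("ou", "aʊ"),
--     ("oi", "ɔɪ"), ("ai", "eɪ"), ("ay", "eɪ"), ("ey", "eɪ"),
--     ("a", "æ"), ("e", "ɛ"), ("i", "ɪ"), ("o", "ɒ"), ("u", "ʌ"),
-- ]
--
-- # A prefix trie of the source graphemes: each node is a dict mapping a character
-- # to a child node; the key '' at a node holds the IPA target of the source
-- # spelled by the path to that node.  Longest match = deepest output on the walk.
--
--
-- def _insert(src, tgt, node):
--     node = dict(node)
--     if not src:
--         node[''] = tgt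
--         return node
--     c, cs = src[0], src[1:]
--     node[c] = _insert(cs, tgt, node.get(c, {}))
--     return node
--
--
-- _TRIE = {}
-- for _src, _tgt in _EN_FALLBACK:
--     _TRIE = _insert(list(_src), _tgt, _TRIE)
--
--
-- def _longest(node, s, j, best):
--     # walk the trie along s from position j, remembering the deepest output
--     # seen as (target, position after the matched source)
--     if j < len(s) and s[j] in node:
--         child = node[s[j]]
--         if '' in child:
--             best = (child[''], j + 1)
--         return _longest(child, s, j + 1, best)
--     return best
--
--
-- def _fallback_eng_ipa(w: str) -> str:
--     s = w.lower()
--     out, i = [], 0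
--     while i < len(s):
--         m = _longest(_TRIE, s, i, None)
--         if m is None:
--             out.append(s[i])
--             i += 1
--         else:
--             tgt, i = m
--             out.append(tgt)
--     return ''.join(out)
-- ===== Notes on version B (the rewrite author's own statement) =====
-- stated objective: faster
-- what changed: Replaces A's per-position length-bucket scan (for L in (4,3,2,1): slice s[i:i+L] and compare it against all 19 table entries) by a prefix trie of the source graphemes built once; each position does one trie walk of at most 5 dict lookups with no slicing and no table scan.
import Mathlib
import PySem

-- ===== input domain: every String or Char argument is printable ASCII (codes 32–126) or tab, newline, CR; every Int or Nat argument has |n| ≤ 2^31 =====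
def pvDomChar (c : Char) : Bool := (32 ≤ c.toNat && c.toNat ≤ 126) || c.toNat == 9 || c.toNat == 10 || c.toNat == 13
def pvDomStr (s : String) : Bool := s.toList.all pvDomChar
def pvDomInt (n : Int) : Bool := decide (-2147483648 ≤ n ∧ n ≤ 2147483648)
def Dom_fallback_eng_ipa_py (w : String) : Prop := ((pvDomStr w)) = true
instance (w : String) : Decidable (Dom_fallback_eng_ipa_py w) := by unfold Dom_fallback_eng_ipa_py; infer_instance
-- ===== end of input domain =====

-- B replaces A's per-position length-bucket scan (for L in (4,3,2,1): slice and scan the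
-- whole table) by a prefix trie of the source graphemes built once; each position does one
-- trie walk instead of up to 4 slices x 19 comparisons (objective: faster; same results).

-- ===== PORT A =====
-- _EN_FALLBACK, as a list of (source graphemes, target IPA) over List Char
def fbTable : List (List Char × List Char) :=
  [("tion".toList, "ʃən".toList), ("ing".toList, "ɪŋ".toList), ("ck".toList, "k".toList),
   ("sh".toList, "ʃ".toList), ("ch".toList, "tʃ".toList), ("ph".toList, "f".toList),
   ("th".toList, "θ".toList), ("oo".toList, "uː".toList), ("ee".toList, "iː".toList),
   ("ou".toList, "aʊ".toList), ("oi".toList, "ɔɪ".toList), ("ai".toList, "eɪ".toList),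
   ("ay".toList, "eɪ".toList), ("ey".toList, "eɪ".toList), ("a".toList, "æ".toList),
   ("e".toList, "ɛ".toList), ("i".toList, "ɪ".toList), ("o".toList, "ɒ".toList),
   ("u".toList, "ʌ".toList)]

-- inner 'for src, tgt in _EN_FALLBACK: if sub == src: … break'
def scanTable (sub : List Char) : List (List Char × List Char) → Option (List Char)
  | [] => none
  | (src, tgt) :: rest => if sub = src then some tgt else scanTable sub rest

-- middle 'for L in (4, 3, 2, 1)' loop: the length guard (continue), sub = s[i:i+L],
-- and the table scan; returns (tgt, L) of the first match, none if no L matched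
def tryLens (s : List Char) (i : Nat) : List Nat → Option (List Char × Nat)
  | [] => none
  | L :: rest =>
    if s.length < i + L then tryLens s i rest
    else
      match scanTable ((s.drop i).take L) fbTable with
      | some tgt => some (tgt, L)
      | none => tryLens s i rest

-- the 'while i < len(s)' loop; fuel = len(s) suffices since i strictly increases
def aLoop (s : List Char) : Nat → Nat → List Char → List Char
  | 0, _, out => out
  | fuel + 1, i, out =>
    if h : i < s.length then
      match tryLens s i [4, 3, 2, 1] with
      | some (tgt, L) => aLoop s fuel (i + L) (out ++ tgt)
      | none => aLoop s fuel (i + 1) (out ++ [s[i]])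
    else out

def fallback_eng_ipa_py (w : String) : String :=
  String.ofList (aLoop (PySem.Str.lower w).toList ((PySem.Str.lower w).toList.length) 0 [])

-- ===== PORT B =====
-- a trie node: dict from Char to child nodes, plus the optional output at the '' key
mutual
inductive Trie where
  | node : Option (List Char) → Kids → Trie
  deriving DecidableEq
inductive Kids where
  | nil : Kids
  | cons : Char → Trie → Kids → Kids
  deriving DecidableEq
end

-- node.get(c): the child for character c, if any
def getChild : Kids → Char → Option Trie
  | Kids.nil, _ => none
  | Kids.cons c' t rest, c => if c' = c then some t else getChild rest c

-- node[c] = t: overwrite in place, or append at the end (Python dict assignment)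
def setChild : Kids → Char → Trie → Kids
  | Kids.nil, c, t => Kids.cons c t Kids.nil
  | Kids.cons c' t' rest, c, t =>
    if c' = c then Kids.cons c' t rest else Kids.cons c' t' (setChild rest c t)

-- _insert(src, tgt, node): functional insertion, recursion on src
def insertT : List Char → List Char → Trie → Trie
  | [], tgt, Trie.node _ kids => Trie.node (some tgt) kids
  | c :: cs, tgt, Trie.node o kids =>
    Trie.node o (setChild kids c (insertT cs tgt ((getChild kids c).getD (Trie.node none Kids.nil))))

-- _TRIE: fold _insert over the table
def theTrie : Trie :=
  fbTable.foldl (fun t p => insertT p.1 p.2 t) (Trie.node none Kids.nil)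

-- _longest(node, s, j, best): walk the trie along s from position j, remembering the
-- deepest output seen as (target, position after the matched source)
def longestB (s : List Char) : Trie → Nat → Option (List Char × Nat) → Option (List Char × Nat)
  | Trie.node _ kids, j, best =>
    if h : j < s.length then
      match getChild kids s[j] with
      | some child =>
        longestB s child (j + 1)
          (match child with
           | Trie.node (some v) _ => some (v, j + 1)
           | Trie.node none _ => best)
      | none => best
    else best
termination_by _ j _ => s.length - j
decreasing_by omega

-- the 'while i < len(s)' loop; fuel = len(s) suffices since i strictly increases
def bLoop (s : List Char) : Nat → Nat → List Char → List Char
  | 0, _, out => out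
  | fuel + 1, i, out =>
    if h : i < s.length then
      match longestB s theTrie i none with
      | some (tgt, j) => bLoop s fuel j (out ++ tgt)
      | none => bLoop s fuel (i + 1) (out ++ [s[i]])
    else out

def fallback_eng_ipa_py_alt (w : String) : String :=
  String.ofList (bLoop (PySem.Str.lower w).toList ((PySem.Str.lower w).toList.length) 0 [])

-- ===== PRECONDITION & SPEC =====
def Spec_fallback_eng_ipa_py (w : String) (out : String) : Prop := out = fallback_eng_ipa_py_alt w
instance (w : String) (out : String) : Decidable (Spec_fallback_eng_ipa_py w out) := by unfold Spec_fallback_eng_ipa_py; infer_instance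

-- ===== CLAIM (what is proved, stated in full; the proofs are below) =====
def Claim_equal_fallback_eng_ipa_py : Prop := ∀ (w : String), Dom_fallback_eng_ipa_py w → Spec_fallback_eng_ipa_py w (fallback_eng_ipa_py w)

-- ===== LEMMAS AND PROOFS =====

-- the value stored in a trie under a key (path of characters)
def lookupT : Trie → List Char → Option (List Char)
  | Trie.node o _, [] => o
  | Trie.node _ kids, c :: cs => (getChild kids c).bind (fun t => lookupT t cs)

lemma getChild_setChild (c c' : Char) (t : Trie) :
    ∀ (k : Kids), getChild (setChild k c t) c' = if c' = c then some t else getChild k c'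
  | Kids.nil => by
    by_cases h : c' = c
    · simp [setChild, getChild, h]
    · simp [setChild, getChild, h, Ne.symm h]
  | Kids.cons a u rest => by
    by_cases hac : a = c
    · subst hac
      by_cases h : c' = a
      · simp [setChild, getChild, h]
      · simp [setChild, getChild, h, Ne.symm h]
    · by_cases h : c' = a
      · subst h
        simp [setChild, getChild, hac]
      · simp [setChild, getChild, hac, Ne.symm h, getChild_setChild c c' t rest]

lemma lookupT_empty (key : List Char) : lookupT (Trie.node none Kids.nil) key = none := by
  cases key <;> simp [lookupT, getChild]

-- insertion spec: inserting src↦tgt changes exactly the key src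
lemma lookupT_insertT (src : List Char) (tgt : List Char) :
    ∀ (T : Trie) (key : List Char),
      lookupT (insertT src tgt T) key = if key = src then some tgt else lookupT T key := by
  induction src with
  | nil =>
    intro T key
    obtain ⟨o, kids⟩ := T
    cases key <;> simp [insertT, lookupT]
  | cons a as ih =>
    intro T key
    obtain ⟨o, kids⟩ := T
    cases key with
    | nil => simp [insertT, lookupT]
    | cons c cs =>
      simp only [insertT, lookupT, getChild_setChild]
      by_cases hca : c = a
      · subst hca
        simp only [if_true, Option.bind_some]
        rw [ih]
        by_cases hcs : cs = as
        · simp [hcs]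
        · have hne : ¬ (c :: cs = c :: as) := by simp [hcs]
          simp only [hcs, if_false, hne]
          cases hgch : getChild kids c with
          | none => simp [lookupT_empty]
          | some t => simp
      · have hne : ¬ (c :: cs = a :: as) := by simp [hca]
        simp [hca, hne]

-- building by folding insertions: the last insertion for a key wins
lemma lookupT_build (tb : List (List Char × List Char)) :
    ∀ (T : Trie) (key : List Char),
      lookupT (tb.foldl (fun t p => insertT p.1 p.2 t) T) key
        = ((tb.reverse.find? (fun p => decide (key = p.1))).map Prod.snd).or (lookupT T key) := by
  induction tb with
  | nil => intro T key; simp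
  | cons p rest ih =>
    intro T key
    simp only [List.foldl_cons, List.reverse_cons, List.find?_append, ih]
    rw [lookupT_insertT]
    by_cases h : key = p.1
    · simp [List.find?, h]
    · simp [List.find?, h]

-- with pairwise-distinct keys, first match = last match
lemma find?_reverse_of_pairwise {α : Type} (l : List α) (q : α → Bool)
    (hp : l.Pairwise (fun a b => q a → ¬ q b = true)) :
    l.reverse.find? q = l.find? q := by
  induction l with
  | nil => rfl
  | cons a t ih =>
    rw [List.pairwise_cons] at hp
    rw [List.reverse_cons, List.find?_append, ih hp.2]
    by_cases ha : q a
    · have : t.find? q = none := by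
        rw [List.find?_eq_none]
        intro x hx
        exact hp.1 x hx ha
      simp [this, List.find?, ha]
    · simp [List.find?, ha]

-- lookup in the built trie = the original linear table scan
lemma lookupT_theTrie (key : List Char) :
    lookupT theTrie key = scanTable key fbTable := by
  have hscan : ∀ tb, scanTable key tb = (tb.find? (fun p => decide (key = p.1))).map Prod.snd := by
    intro tb
    induction tb with
    | nil => rfl
    | cons hd tl ihh =>
      obtain ⟨src, tgt⟩ := hd
      by_cases h : key = src <;> simp [scanTable, List.find?, h, ihh]
  have hpw : fbTable.Pairwise (fun a b => (fun p => decide (key = p.1)) a →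
      ¬ (fun p => decide (key = p.1)) b = true) := by
    have hnd : fbTable.Pairwise (fun a b : List Char × List Char => a.1 ≠ b.1) := by decide
    refine hnd.imp ?_
    intro a b hne ha hb
    simp only [decide_eq_true_eq] at ha hb
    exact hne (ha ▸ hb)
  rw [theTrie, lookupT_build, find?_reverse_of_pairwise _ _ hpw, hscan, lookupT_empty,
    Option.or_none]

-- all sources have length ≤ 4, so longer keys find nothing
lemma lookupT_long (key : List Char) (h : 5 ≤ key.length) :
    lookupT theTrie key = none := by
  rw [lookupT_theTrie]
  have hscan : ∀ tb : List (List Char × List Char), (∀ p ∈ tb, p.1.length ≤ 4) →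
      scanTable key tb = none := by
    intro tb
    induction tb with
    | nil => intro _; rfl
    | cons hd tl ihh =>
      intro hall
      obtain ⟨src, tgt⟩ := hd
      have h1 : src.length ≤ 4 := hall (src, tgt) (List.mem_cons_self ..)
      have hne : ¬ key = src := by
        intro he; rw [he] at h; omega
      simp [scanTable, hne, ihh (fun p hp => hall p (List.mem_cons_of_mem _ hp))]
  exact hscan fbTable (by decide)

lemma map_or {α β : Type} (f : α → β) (a b : Option α) :
    (a.or b).map f = (a.map f).or (b.map f) := by cases a <;> rfl

-- descending chain of matches from position j: try length n, then n-1, …, then 1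
def descI (s : List Char) (T : Trie) (j : Nat) : Nat → Option (List Char × Nat)
  | 0 => none
  | L + 1 =>
    ((lookupT T ((s.drop j).take (L + 1))).map (fun v => (v, j + (L + 1)))).or (descI s T j L)

lemma descI_cons (s : List Char) (j : Nat) (hj : j < s.length) (T' : Trie)
    (o : Option (List Char)) (kids : Kids) (hg : getChild kids s[j] = some T') :
    ∀ L, descI s (Trie.node o kids) j (L + 1)
      = (descI s T' (j + 1) L).or (((match T' with
          | Trie.node (some v) _ => some v
          | Trie.node none _ => none) : Option (List Char)).map (fun v => (v, j + 1))) := by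
  have hdrop : s.drop j = s[j] :: s.drop (j + 1) := List.drop_eq_getElem_cons hj
  intro L
  induction L with
  | zero =>
    obtain ⟨ov, k'⟩ := T'
    rw [descI, descI, hdrop]
    simp only [List.take_succ_cons, List.take_zero, lookupT, hg, Option.bind_some,
      Option.or_none, Option.none_or]
    cases ov <;> rfl
  | succ L ih =>
    rw [descI, ih]
    have h1 : lookupT (Trie.node o kids) ((s.drop j).take (L + 2))
        = lookupT T' ((s.drop (j + 1)).take (L + 1)) := by
      rw [hdrop, (rfl : (L + 2) = (L + 1) + 1), List.take_succ_cons]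
      simp [lookupT, hg]
    have h2 : j + (L + 2) = (j + 1) + (L + 1) := by omega
    rw [h1, h2, ← Option.or_assoc]
    rfl

-- the trie walk returns the deepest match, else the carried best
lemma longestB_eq_descI (s : List Char) : ∀ (k j : Nat), k = s.length - j →
    ∀ (T : Trie) (best : Option (List Char × Nat)),
      longestB s T j best = (descI s T j k).or best := by
  intro k
  induction k with
  | zero =>
    intro j hk T best
    obtain ⟨o, kids⟩ := T
    have hj : ¬ j < s.length := by omega
    rw [longestB, dif_neg hj]
    rfl
  | succ k ih =>
    intro j hk T best
    obtain ⟨o, kids⟩ := T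
    have hj : j < s.length := by omega
    rw [longestB, dif_pos hj]
    cases hg : getChild kids s[j] with
    | none =>
      have hdrop : s.drop j = s[j] :: s.drop (j + 1) := List.drop_eq_getElem_cons hj
      have hnone : ∀ L, descI s (Trie.node o kids) j L = none := by
        intro L
        induction L with
        | zero => rfl
        | succ L ihL =>
          rw [descI, ihL]
          have hlk : lookupT (Trie.node o kids) ((s.drop j).take (L + 1)) = none := by
            rw [hdrop, List.take_succ_cons]
            simp [lookupT, hg]
          simp [hlk]
      rw [hnone]
      rfl
    | some T' =>
      obtain ⟨ov, k'⟩ := T'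
      rw [descI_cons s j hj (Trie.node ov k') o kids hg k]
      cases ov with
      | none =>
        show longestB s (Trie.node none k') (j + 1) best = _
        rw [ih (j + 1) (by omega) (Trie.node none k') best]
        simp
      | some v =>
        show longestB s (Trie.node (some v) k') (j + 1) (some (v, j + 1)) = _
        rw [ih (j + 1) (by omega) (Trie.node (some v) k') (some (v, j + 1))]
        simp

-- for n ≥ 4 (within the string), descI stabilises at 4: no source is longer
lemma descI_ge4 (s : List Char) (j : Nat) : ∀ n, 4 ≤ n → n ≤ s.length - j →
    descI s theTrie j n = descI s theTrie j 4 := by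
  intro n
  induction n with
  | zero => omega
  | succ L ih =>
    intro h4 hlen
    by_cases hL : 4 ≤ L
    · rw [descI]
      have hlong : lookupT theTrie ((s.drop j).take (L + 1)) = none := by
        apply lookupT_long
        rw [List.length_take, List.length_drop]
        omega
      rw [hlong]
      simp only [Option.map_none, Option.none_or]
      exact ih hL (by omega)
    · have h44 : L + 1 = 4 := by omega
      rw [h44]

-- the step of A (length loop over slices) = the step of B (trie walk from position i)
lemma step_eq (s : List Char) (i : Nat) (hi : i < s.length) :
    longestB s theTrie i none
      = (tryLens s i [4, 3, 2, 1]).map (fun p => (p.1, i + p.2)) := by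
  have hldrop : (s.drop i).length = s.length - i := List.length_drop ..
  have hstep : ∀ (L : Nat) (rest : List Nat), tryLens s i (L :: rest)
      = (if (s.drop i).length < L then (none : Option (List Char × Nat))
          else (lookupT theTrie ((s.drop i).take L)).map (fun v => (v, L))).or
          (tryLens s i rest) := by
    intro L rest
    by_cases h : (s.drop i).length < L
    · have h2 : s.length < i + L := by omega
      simp only [tryLens, if_pos h2, if_pos h, Option.none_or]
    · have h2 : ¬ s.length < i + L := by omega
      simp only [tryLens, if_neg h2, if_neg h, lookupT_theTrie]
      cases hsc : scanTable ((s.drop i).take L) fbTable <;> simp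
  have hnil : tryLens s i [] = none := rfl
  rw [longestB_eq_descI s (s.length - i) i rfl theTrie none, Option.or_none,
    hstep, hstep, hstep, hstep, hnil]
  simp only [map_or, Option.or_none]
  split_ifs with h1 h2 h3 h4
  all_goals try (exfalso; omega)
  all_goals first
    | (rw [descI_ge4 s i (s.length - i) (by omega) le_rfl]
       simp only [descI, Option.map_map, Option.or_none]
       rfl)
    | (rw [show s.length - i = 3 by omega]
       simp only [descI, Option.map_map, Option.or_none]
       rfl)
    | (rw [show s.length - i = 2 by omega]
       simp only [descI, Option.map_map, Option.or_none]
       rfl)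
    | (rw [show s.length - i = 1 by omega]
       simp only [descI, Option.map_map, Option.or_none]
       rfl)

-- the two index loops agree step for step
lemma loop_eq (s : List Char) : ∀ (fuel i : Nat) (out : List Char),
    aLoop s fuel i out = bLoop s fuel i out := by
  intro fuel
  induction fuel with
  | zero => intro i out; rfl
  | succ fuel ih =>
    intro i out
    by_cases hi : i < s.length
    · rw [aLoop, bLoop, dif_pos hi, dif_pos hi, step_eq s i hi]
      cases hf : tryLens s i [4, 3, 2, 1] with
      | none => simpa using ih (i + 1) (out ++ [s[i]])
      | some p =>
        obtain ⟨tgt, L⟩ := p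
        simpa using ih (i + L) (out ++ tgt)
    · rw [aLoop, bLoop, dif_neg hi, dif_neg hi]

-- ===== VERDICT (by name: the statement is the Claim_ definition above) =====
theorem fallback_eng_ipa_py_spec : Claim_equal_fallback_eng_ipa_py := by
  intro w _
  unfold Spec_fallback_eng_ipa_py fallback_eng_ipa_py fallback_eng_ipa_py_alt
  rw [loop_eq]
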